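-- pv_equiv track=rewrite | github.com/robot-mazeee/Advent-of-Code | 2024/Day 6/Day 6.py | check_visted_direction
-- ===== SOURCE A (Python) =====
-- def check_visted_direction(x, y, visited):
--     if (x, y) not in visited.keys():
--         return False
--
--     visited_dirs = []
--     for direction in visited[(x, y)]:
--         if direction in visited_dirs:
--             return True
--         visited_dirs.append(direction)
--
--     return False
-- ===== SOURCE B (Python) =====
-- def check_visted_direction(x, y, visited):
--     if (x, y) not in visited:
--         return False
--     lst = visited[(x, y)]
--     return len(lst) != len(set(lst))
-- ===== Notes on version B (the rewrite author's own statement) =====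
-- stated objective: simpler
-- what changed: Replaces the element-by-element scan with an early-exit duplicate check by a single whole-list comparison of len(lst) against len(set(lst)).
import Mathlib
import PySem

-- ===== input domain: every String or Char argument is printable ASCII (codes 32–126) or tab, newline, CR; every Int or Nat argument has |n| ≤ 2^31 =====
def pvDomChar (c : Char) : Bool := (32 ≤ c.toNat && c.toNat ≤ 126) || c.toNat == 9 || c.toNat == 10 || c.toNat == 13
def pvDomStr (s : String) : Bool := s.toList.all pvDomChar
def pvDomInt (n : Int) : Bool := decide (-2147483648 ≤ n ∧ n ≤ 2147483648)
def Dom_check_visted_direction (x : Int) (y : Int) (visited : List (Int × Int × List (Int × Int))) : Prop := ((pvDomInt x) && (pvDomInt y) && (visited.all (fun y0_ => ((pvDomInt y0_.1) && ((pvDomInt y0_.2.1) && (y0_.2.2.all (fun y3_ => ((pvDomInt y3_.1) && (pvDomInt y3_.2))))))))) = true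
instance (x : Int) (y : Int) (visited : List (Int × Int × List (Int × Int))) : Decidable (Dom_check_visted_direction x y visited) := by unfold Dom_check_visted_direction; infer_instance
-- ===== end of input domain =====

-- B replaces A's element-by-element early-exit duplicate scan with one len(lst) != len(set(lst)) comparison (simpler).

-- ===== PORT A =====
-- the for-loop over visited[(x,y)] with the growing visited_dirs accumulator and early return True
def chkLoopA (dirs : List (Int × Int)) (acc : List (Int × Int)) : Bool :=
  match dirs with
  | [] => false
  | d :: rest => if acc.contains d then true else chkLoopA rest (acc ++ [d])

def check_visted_direction (x : Int) (y : Int) (visited : List (Int × Int × List (Int × Int))) : Bool :=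
  match visited.find? (fun e => e.1 == x && e.2.1 == y) with   -- (x,y) in visited.keys() / visited[(x,y)] : first match
  | none => false
  | some e => chkLoopA e.2.2 []

-- ===== PORT B =====
def check_visted_direction_alt (x : Int) (y : Int) (visited : List (Int × Int × List (Int × Int))) : Bool :=
  match visited.find? (fun e => e.1 == x && e.2.1 == y) with
  | none => false
  | some e => decide (¬ ((e.2.2.length : Int) = ((PySem.Set.ofList e.2.2).length : Int)))  -- len(lst) != len(set(lst))

-- ===== PRECONDITION & SPEC =====
def Spec_check_visted_direction (x : Int) (y : Int) (visited : List (Int × Int × List (Int × Int))) (out : Bool) : Prop := out = check_visted_direction_alt x y visited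
instance (x : Int) (y : Int) (visited : List (Int × Int × List (Int × Int))) (out : Bool) : Decidable (Spec_check_visted_direction x y visited out) := by unfold Spec_check_visted_direction; infer_instance

-- ===== CLAIM (what is proved, stated in full; the proofs are below) =====
def Claim_equal_check_visted_direction : Prop := ∀ (x : Int) (y : Int) (visited : List (Int × Int × List (Int × Int))), Dom_check_visted_direction x y visited → Spec_check_visted_direction x y visited (check_visted_direction x y visited)

-- ===== LEMMAS AND PROOFS =====

-- A's loop returns true iff acc ++ dirs has a duplicate, provided acc is duplicate-free
theorem chkLoopA_eq (dirs : List (Int × Int)) (acc : List (Int × Int)) (h : acc.Nodup) :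
    chkLoopA dirs acc = !decide ((acc ++ dirs).Nodup) := by
  induction dirs generalizing acc with
  | nil => simp [chkLoopA, h]
  | cons d rest ih =>
    by_cases hd : d ∈ acc
    · have hnn : ¬ (acc ++ d :: rest).Nodup := by
        intro hn
        have h2 : (acc ++ d :: rest).count d ≤ 1 := List.nodup_iff_count_le_one.mp hn d
        have h1 : 1 ≤ acc.count d := List.one_le_count_iff.mpr hd
        simp [List.count_append, List.count_cons_self] at h2
        omega
      simp [chkLoopA, hnn]
      exact Or.inl hd
    · have hnd : (acc ++ [d]).Nodup := by
        refine List.Nodup.append h (List.nodup_singleton d) ?_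
        intro a ha hb
        rw [List.mem_singleton] at hb
        exact hd (hb ▸ ha)
      have hc : acc.contains d = false := by rw [List.contains_eq_mem]; exact decide_eq_false hd
      simp only [chkLoopA, hc, Bool.false_eq_true, if_false]
      rw [ih _ hnd, List.append_assoc, List.singleton_append]

-- length (ofList l) = length l → l.Nodup
theorem ofList_len_eq_imp_nodup (l : List (Int × Int)) (h : (PySem.Set.ofList l).length = l.length) : l.Nodup := by
  induction l with
  | nil => exact List.nodup_nil
  | cons x xs ih =>
    rw [PySem.Set.ofList_cons] at h
    simp only [List.length_cons] at h
    have hfle : ((PySem.Set.ofList xs).discard x).length ≤ (PySem.Set.ofList xs).length :=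
      List.length_filter_le _ _
    have hole : (PySem.Set.ofList xs).length ≤ xs.length := PySem.Set.length_ofList_le xs
    have hxs : (PySem.Set.ofList xs).length = xs.length := by omega
    have hfeq : ((PySem.Set.ofList xs).discard x).length = (PySem.Set.ofList xs).length := by omega
    have hx : x ∉ PySem.Set.ofList xs := by
      intro hmem
      have : ((PySem.Set.ofList xs).discard x).length < (PySem.Set.ofList xs).length := by
        apply List.length_filter_lt_length_iff_exists.mpr
        exact ⟨x, hmem, by simp⟩
      omega
    exact List.nodup_cons.mpr ⟨fun hm => hx ((PySem.Set.mem_ofList xs x).mpr hm), ih hxs⟩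

-- B's size comparison detects exactly non-Nodup
theorem setlen_eq (l : List (Int × Int)) :
    decide (¬ ((l.length : Int) = ((PySem.Set.ofList l).length : Int))) = !decide l.Nodup := by
  by_cases h : l.Nodup
  · simp [h, PySem.Set.ofList_eq_self_of_nodup l h]
  · simp [h]
    have hle : (PySem.Set.ofList l).length ≤ l.length := PySem.Set.length_ofList_le l
    intro heq
    have : (PySem.Set.ofList l).length = l.length := by omega
    -- if lengths agree, ofList l (a Nodup sublist-like dedup) equals l up to nodup; derive contradiction
    exact absurd (ofList_len_eq_imp_nodup l this) h

theorem check_visted_direction_spec : Claim_equal_check_visted_direction := by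
  intro x y visited _
  unfold Spec_check_visted_direction check_visted_direction check_visted_direction_alt
  cases visited.find? (fun e => e.1 == x && e.2.1 == y) with
  | none => rfl
  | some e =>
    show chkLoopA e.2.2 [] = decide (¬ ((e.2.2.length : Int) = ((PySem.Set.ofList e.2.2).length : Int)))
    rw [chkLoopA_eq _ _ List.nodup_nil, List.nil_append, setlen_eq]
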